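-- pv_equiv track=rewrite | github.com/382335657/pythonHomework | Code/CodeRecords/2340/60760/272536.py | func
-- ===== SOURCE A (Python) =====
-- def func(arr:list): #实现功能的函数
--     left=arr[0]
--     right=arr[len(arr)-2]
--     rain=0
--     for i in range(1,len(arr)-1):
--         if arr[i]<arr[i-1]:
--             rain=rain+arr[i-1]-arr[i]
--             arr[i]=arr[i-1]
--
--     return rain
-- ===== SOURCE B (Python) =====
-- def func(arr: list):
--     pref = [arr[0]]
--     for x in arr[1:]:
--         pref.append(pref[-1] if pref[-1] > x else x)
--     n = len(arr)
--     rain = sum(pref[i] - arr[i] for i in range(1, n - 1))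
--     arr[1:n-1] = pref[1:n-1]
--     return rain
-- ===== Notes on version B (the rewrite author's own statement) =====
-- stated objective: alternative
-- what changed: B first builds the whole prefix-maximum table of the array and then sums the lift pref[i]-arr[i] over the interior indices (and writes the table back), instead of A's single pass that accumulates differences while mutating the running maximum into the array.
import Mathlib
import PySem

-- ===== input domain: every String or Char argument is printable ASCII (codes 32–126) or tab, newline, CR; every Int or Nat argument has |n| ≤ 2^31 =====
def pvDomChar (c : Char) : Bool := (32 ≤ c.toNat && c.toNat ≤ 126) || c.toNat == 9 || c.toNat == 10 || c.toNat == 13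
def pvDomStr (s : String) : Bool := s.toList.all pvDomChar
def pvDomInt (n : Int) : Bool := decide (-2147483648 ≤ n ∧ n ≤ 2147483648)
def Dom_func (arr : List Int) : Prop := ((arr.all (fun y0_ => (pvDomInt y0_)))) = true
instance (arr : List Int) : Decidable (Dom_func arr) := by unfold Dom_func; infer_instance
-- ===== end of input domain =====

-- B builds a prefix-maximum table first and then sums the lift pref[i]-arr[i] at each interior
-- index, instead of A's single mutating running-max pass (objective: alternative decomposition).
-- A mutates arr in place (the Python B performs the same mutation); the equivalence proved here
-- is about the RETURN value only.

-- ===== PORT A =====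
-- the loop body: reads arr[i], arr[i-1] from the mutated list, may set arr[i]
def funcStep (st : List Int × Int) (i : Int) : List Int × Int :=
  if PySem.List.pyGetD st.1 i 0 < PySem.List.pyGetD st.1 (i - 1) 0 then
    (PySem.List.pySetD st.1 i (PySem.List.pyGetD st.1 (i - 1) 0),
     st.2 + PySem.List.pyGetD st.1 (i - 1) 0 - PySem.List.pyGetD st.1 i 0)
  else st

def func (arr : List Int) : Int :=
  let _left := PySem.List.pyGetD arr 0 0
  let _right := PySem.List.pyGetD arr ((arr.length : Int) - 2) 0
  ((PySem.List.pyRange 1 ((arr.length : Int) - 1) 1).foldl funcStep (arr, 0)).2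

-- ===== PORT B =====
-- pref.append(pref[-1] if pref[-1] > x else x)
def funcAltStep (p : List Int) (x : Int) : List Int :=
  p ++ [if PySem.List.pyGetD p (-1) 0 > x then PySem.List.pyGetD p (-1) 0 else x]

def func_alt (arr : List Int) : Int :=
  let pref := (PySem.List.slice arr (some 1) none).foldl funcAltStep [PySem.List.pyGetD arr 0 0]
  let n : Int := (arr.length : Int)
  ((PySem.List.pyRange 1 (n - 1) 1).map
    (fun i => PySem.List.pyGetD pref i 0 - PySem.List.pyGetD arr i 0)).sum

-- ===== PRECONDITION & SPEC =====
-- A raises IndexError on the empty list (arr[0]); so does B in Python.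
def Pre_func (arr : List Int) : Prop := arr ≠ []
instance (arr : List Int) : Decidable (Pre_func arr) := by unfold Pre_func; infer_instance
def pvWitness_func : List Int := [3, 0, 2, 1, 4]
def Spec_func (arr : List Int) (out : Int) : Prop := out = func_alt arr
instance (arr : List Int) (out : Int) : Decidable (Spec_func arr out) := by unfold Spec_func; infer_instance

-- ===== CLAIM (what is proved, stated in full; the proofs are below) =====
def Claim_equal_func : Prop := ∀ (arr : List Int), Dom_func arr → Pre_func arr → Spec_func arr (func arr)

-- ===== LEMMAS AND PROOFS =====

-- running-maximum tail: pmTail m xs = prefix maxima of m::xs, without the leading m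
def pmTail (m : Int) : List Int → List Int
  | [] => []
  | x :: t => max m x :: pmTail (max m x) t

-- total rain collected over a whole list, running maximum started at m
def rainRec (m : Int) : List Int → Int
  | [] => 0
  | x :: t => (max m x - x) + rainRec (max m x) t

lemma pmTail_take (m : Int) (xs : List Int) (j : Nat) :
    (pmTail m xs).take j = pmTail m (xs.take j) := by
  induction xs generalizing m j with
  | nil => simp [pmTail]
  | cons x t ih =>
    cases j with
    | zero => simp [pmTail]
    | succ j => simp [pmTail, ih]

lemma getD_take_of_lt (l : List Int) (j k : Nat) (d : Int) (h : k < j) :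
    (l.take j).getD k d = l.getD k d := by
  simp [List.getD_eq_getElem?_getD, h]

lemma getD_append_at (q l' : List Int) (k : Nat) (d : Int) :
    (q ++ l').getD (q.length + k) d = l'.getD k d := by
  simp [List.getD_eq_getElem?_getD, List.getElem?_append_right (Nat.le_add_right q.length k)]

lemma set_append_at (q l' : List Int) (k : Nat) (v : Int) :
    (q ++ l').set (q.length + k) v = q ++ l'.set k v := by
  induction q with
  | nil => simp
  | cons a q ih => simp [List.length_cons, Nat.succ_add, ih]

-- B's fold builds the prefix-maximum table
lemma foldB (xs : List Int) : ∀ (q : List Int) (m : Int),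
    xs.foldl funcAltStep (q ++ [m]) = (q ++ [m]) ++ pmTail m xs := by
  induction xs with
  | nil => intro q m; simp [pmTail]
  | cons x t ih =>
    intro q m
    have hstep : funcAltStep (q ++ [m]) x = (q ++ [m]) ++ [max m x] := by
      unfold funcAltStep
      rw [PySem.List.pyGetD_neg_one_append_singleton q m 0]
      congr 1
      split_ifs with h
      · rw [max_eq_left (le_of_lt h)]
      · rw [max_eq_right (not_lt.mp h)]
    rw [List.foldl_cons, hstep, ih (q ++ [m]) (max m x)]
    simp [pmTail, List.append_assoc]

-- A's loop: state q ++ [m] ++ tl at index |q|+1, running maximum m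
lemma foldA (tl : List Int) : ∀ (q : List Int) (m rain : Int),
    ((PySem.List.pyRange ((q.length : Int) + 1) ((q.length : Int) + 1 + (tl.length : Int) - 1) 1).foldl
      funcStep (q ++ [m] ++ tl, rain)).2 = rain + rainRec m tl.dropLast := by
  induction tl with
  | nil =>
    intro q m rain
    rw [PySem.List.pyRange_one_eq_nil (by simp)]
    simp [rainRec]
  | cons x t ih =>
    intro q m rain
    by_cases ht : t = []
    · subst ht
      rw [PySem.List.pyRange_one_eq_nil (by simp)]
      simp [rainRec]
    · have htl : 0 < t.length := List.length_pos_of_ne_nil ht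
      have hlt : (q.length : Int) + 1 < (q.length : Int) + 1 + ((x :: t).length : Int) - 1 := by
        simp [List.length_cons]; omega
      rw [PySem.List.pyRange_one_cons hlt, List.foldl_cons]
      have hcast1 : (q.length : Int) + 1 = ((q.length + 1 : Nat) : Int) := by push_cast; ring
      have hx : PySem.List.pyGetD (q ++ [m] ++ x :: t) ((q.length : Int) + 1) 0 = x := by
        rw [hcast1, PySem.List.pyGetD_natCast, List.append_assoc]
        simpa using getD_append_at q (m :: x :: t) 1 0
      have hm : PySem.List.pyGetD (q ++ [m] ++ x :: t) ((q.length : Int) + 1 - 1) 0 = m := by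
        have : (q.length : Int) + 1 - 1 = ((q.length : Nat) : Int) := by ring
        rw [this, PySem.List.pyGetD_natCast, List.append_assoc]
        simpa using getD_append_at q (m :: x :: t) 0 0
      have hstep : funcStep (q ++ [m] ++ x :: t, rain) ((q.length : Int) + 1)
          = (q ++ [m] ++ max m x :: t, rain + (max m x - x)) := by
        unfold funcStep
        simp only [hx, hm]
        split_ifs with h
        · have hmax : max m x = m := max_eq_left (le_of_lt h)
          rw [hmax, hcast1, PySem.List.pySetD_natCast, List.append_assoc]
          simp only [List.cons_append, List.nil_append]
          rw [set_append_at q (m :: x :: t) 1 m]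
          simp only [Prod.mk.injEq]
          refine ⟨?_, by ring⟩
          simp [List.append_assoc]
        · have hmax : max m x = x := max_eq_right (not_lt.mp h)
          rw [hmax]
          simp
      rw [hstep]
      have h := ih (q ++ [m]) (max m x) (rain + (max m x - x))
      have hrange : PySem.List.pyRange ((q.length : Int) + 1 + 1)
            ((q.length : Int) + 1 + ((x :: t).length : Int) - 1) 1
          = PySem.List.pyRange (((q ++ [m]).length : Int) + 1)
            (((q ++ [m]).length : Int) + 1 + (t.length : Int) - 1) 1 := by
        congr 1 <;> simp [List.length_append, List.length_cons] <;> push_cast <;> ring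
      have hlist : q ++ [m] ++ max m x :: t = (q ++ [m]) ++ [max m x] ++ t := by
        simp [List.append_assoc]
      rw [hrange, hlist, h]
      rw [List.dropLast_cons_of_ne_nil ht]
      simp [rainRec]; ring

lemma funcA_closed (a0 : Int) (tl : List Int) : func (a0 :: tl) = rainRec a0 tl.dropLast := by
  have h := foldA tl [] a0 0
  simp only [List.nil_append, List.length_nil, Nat.cast_zero, zero_add,
    List.singleton_append] at h
  show ((PySem.List.pyRange 1 (((a0 :: tl).length : Int) - 1) 1).foldl funcStep
    (a0 :: tl, 0)).2 = rainRec a0 tl.dropLast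
  rw [show (((a0 :: tl).length : Int) - 1) = 1 + (tl.length : Int) - 1 by
    push_cast [List.length_cons]; ring]
  rw [h]

lemma rainRec_sum (xs : List Int) : ∀ (m : Int),
    rainRec m xs = ((List.range xs.length).map
      (fun k => (pmTail m xs).getD k 0 - xs.getD k 0)).sum := by
  induction xs with
  | nil => intro m; simp [rainRec]
  | cons x t ih =>
    intro m
    rw [List.length_cons, List.range_succ_eq_map]
    simp only [List.map_cons, List.map_map, List.sum_cons, pmTail]
    have h1 : ((max m x :: pmTail (max m x) t).getD 0 0 - (x :: t).getD 0 0) = max m x - x := by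
      simp
    have h2 : (List.range t.length).map
          ((fun k => ((max m x :: pmTail (max m x) t).getD k 0 - (x :: t).getD k 0)) ∘ Nat.succ)
        = (List.range t.length).map (fun k => (pmTail (max m x) t).getD k 0 - t.getD k 0) := by
      apply List.map_congr_left
      intro k _
      simp [Function.comp]
    rw [h1, h2, ← ih (max m x)]
    rfl

lemma bridge (m : Int) (tl : List Int) :
    rainRec m tl.dropLast = ((List.range (tl.length - 1)).map
      (fun k => (pmTail m tl).getD k 0 - tl.getD k 0)).sum := by
  rw [rainRec_sum, List.length_dropLast]
  apply congrArg List.sum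
  apply List.map_congr_left
  intro k hk
  rw [List.mem_range] at hk
  have h1 : tl.dropLast.getD k 0 = tl.getD k 0 := by
    rw [List.dropLast_eq_take, getD_take_of_lt _ _ _ _ hk]
  have h2 : (pmTail m tl.dropLast).getD k 0 = (pmTail m tl).getD k 0 := by
    rw [List.dropLast_eq_take, ← pmTail_take, getD_take_of_lt _ _ _ _ hk]
  rw [h1, h2]

lemma funcAlt_closed (a0 : Int) (tl : List Int) :
    func_alt (a0 :: tl) = ((List.range (tl.length - 1)).map
      (fun k => (pmTail a0 tl).getD k 0 - tl.getD k 0)).sum := by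
  unfold func_alt
  rw [PySem.List.slice_from_one]
  simp only [List.tail_cons, PySem.List.pyGetD_zero_cons]
  have hpref : tl.foldl funcAltStep [a0] = a0 :: pmTail a0 tl := by
    have := foldB tl [] a0
    simpa using this
  rw [hpref]
  have hb : ((a0 :: tl).length : Int) - 1 = (tl.length : Int) := by
    simp [List.length_cons]
  rw [hb, PySem.List.pyRange_one]
  have hn : ((tl.length : Int) - 1).toNat = tl.length - 1 := by omega
  rw [hn, List.map_map]
  apply congrArg List.sum
  apply List.map_congr_left
  intro k _
  have hcast : (1 : Int) + (k : Int) = ((k + 1 : Nat) : Int) := by push_cast; ring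
  simp only [Function.comp_apply, hcast, PySem.List.pyGetD_natCast, List.getD_cons_succ]

-- ===== VERDICT (by name: the statement is the Claim_ definition above) =====
theorem func_spec : Claim_equal_func := by
  intro arr _ hpre
  unfold Spec_func
  match arr with
  | [] => exact absurd rfl hpre
  | a0 :: tl =>
    rw [funcA_closed, funcAlt_closed, bridge]
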